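-- pv_equiv track=rewrite | github.com/hashi-demo-lab/agent-terraform | src/agents/planner.py | _map_compliance_requirements
-- ===== SOURCE A (Python) =====
-- from typing import Dict, List, Any, Optional
--
-- def _map_compliance_requirements(compliance_reqs: List[str], resource_type: str) -> List[str]:
--     """Map compliance requirements to specific checks for resource type"""
--     mapped_requirements = []
--
--     for req in compliance_reqs:
--         if req.lower() == "security":
--             if "s3" in resource_type:
--                 mapped_requirements.extend(["encryption", "public_access_block", "versioning"])
--             elif "rds" in resource_type:
--                 mapped_requirements.extend(["encryption", "backup", "multi_az"])
--             elif "security_group" in resource_type: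
--                 mapped_requirements.extend(["restricted_ingress", "no_ssh_from_internet"])
--
--         elif req.lower() == "reliability":
--             if "instance" in resource_type:
--                 mapped_requirements.extend(["auto_scaling", "health_checks"])
--             elif "rds" in resource_type:
--                 mapped_requirements.extend(["multi_az", "backup_retention"])
--
--         elif req.lower() == "cost_optimization":
--             mapped_requirements.extend(["appropriate_sizing", "lifecycle_policies"])
--
--     return mapped_requirements
-- ===== SOURCE B (Python) =====
-- _RULES = {
--     "security": [
--         ("s3", ["encryption", "public_access_block", "versioning"]),
--         ("rds", ["encryption", "backup", "multi_az"]),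
--         ("security_group", ["restricted_ingress", "no_ssh_from_internet"]),
--     ],
--     "reliability": [
--         ("instance", ["auto_scaling", "health_checks"]),
--         ("rds", ["multi_az", "backup_retention"]),
--     ],
--     "cost_optimization": [
--         (None, ["appropriate_sizing", "lifecycle_policies"]),
--     ],
-- }
--
--
-- def _first_match(rules, resource_type):
--     for sub, checks in rules:
--         if sub is None or sub in resource_type:
--             return checks
--     return []
--
--
-- def _map_compliance_requirements(compliance_reqs, resource_type):
--     """Map compliance requirements to specific checks for resource type"""
--     # Precompute, once, the check list each category yields for this resource
--     # type, so the per-requirement loop does no substring scanning at all.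
--     checks_for = {cat: _first_match(rules, resource_type)
--                   for cat, rules in _RULES.items()}
--     return [c for req in compliance_reqs
--             for c in checks_for.get(req.lower(), [])]
-- ===== Notes on version B (the rewrite author's own statement) =====
-- stated objective: alternative
-- what changed: Instead of re-running the substring if/elif cascade for every requirement, B builds once per call an index mapping each category to the check list this resource_type yields (first-match over a static rules table), then produces the output as one flat comprehension of index lookups over the requirements.
import Mathlib
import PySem

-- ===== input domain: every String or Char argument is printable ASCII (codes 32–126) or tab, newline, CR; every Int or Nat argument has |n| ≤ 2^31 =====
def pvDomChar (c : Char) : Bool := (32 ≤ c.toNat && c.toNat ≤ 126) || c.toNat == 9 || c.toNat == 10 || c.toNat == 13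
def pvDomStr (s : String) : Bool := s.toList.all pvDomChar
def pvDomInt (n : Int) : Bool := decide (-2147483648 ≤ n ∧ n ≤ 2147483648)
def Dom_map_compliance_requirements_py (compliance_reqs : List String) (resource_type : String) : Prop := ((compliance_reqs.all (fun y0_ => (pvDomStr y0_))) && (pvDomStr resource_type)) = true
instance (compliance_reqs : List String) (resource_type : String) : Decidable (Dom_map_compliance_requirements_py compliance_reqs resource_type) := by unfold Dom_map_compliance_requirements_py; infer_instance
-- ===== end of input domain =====

-- B precomputes, once per call, the check list each category yields for this resource_type, then flat-maps the requests over that index (alternative decomposition: substring scanning leaves the per-request loop).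


-- ===== PORT A =====
def map_compliance_requirements_py (compliance_reqs : List String) (resource_type : String) : List String :=
  compliance_reqs.foldl (fun acc req =>
    if PySem.Str.lower req = "security" then
      if PySem.Str.isIn "s3" resource_type then
        acc ++ ["encryption", "public_access_block", "versioning"]
      else if PySem.Str.isIn "rds" resource_type then
        acc ++ ["encryption", "backup", "multi_az"]
      else if PySem.Str.isIn "security_group" resource_type then
        acc ++ ["restricted_ingress", "no_ssh_from_internet"]
      else acc
    else if PySem.Str.lower req = "reliability" then
      if PySem.Str.isIn "instance" resource_type then
        acc ++ ["auto_scaling", "health_checks"]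
      else if PySem.Str.isIn "rds" resource_type then
        acc ++ ["multi_az", "backup_retention"]
      else acc
    else if PySem.Str.lower req = "cost_optimization" then
      acc ++ ["appropriate_sizing", "lifecycle_policies"]
    else acc) []

-- ===== PORT B =====
-- static rules table (_RULES)
def pvRules : List (String × List (Option String × List String)) :=
  [ ("security",
      [ (some "s3", ["encryption", "public_access_block", "versioning"]),
        (some "rds", ["encryption", "backup", "multi_az"]),
        (some "security_group", ["restricted_ingress", "no_ssh_from_internet"]) ]),
    ("reliability",
      [ (some "instance", ["auto_scaling", "health_checks"]),
        (some "rds", ["multi_az", "backup_retention"]) ]),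
    ("cost_optimization",
      [ (none, ["appropriate_sizing", "lifecycle_policies"]) ]) ]

-- _first_match: first rule whose substring is None or occurs in resource_type
def pvFirstMatch (rules : List (Option String × List String)) (resource_type : String) : List String :=
  match rules with
  | [] => []
  | (none, checks) :: _ => checks
  | (some sub, checks) :: rest =>
    if PySem.Str.isIn sub resource_type then checks else pvFirstMatch rest resource_type

def map_compliance_requirements_py_alt (compliance_reqs : List String) (resource_type : String) : List String :=
  let checksFor := PySem.Dict.ofList (pvRules.map (fun p => (p.1, pvFirstMatch p.2 resource_type)))
  compliance_reqs.flatMap (fun req => checksFor.getD (PySem.Str.lower req) [])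

-- ===== PRECONDITION & SPEC =====
def Spec_map_compliance_requirements_py (compliance_reqs : List String) (resource_type : String) (out : List String) : Prop := out = map_compliance_requirements_py_alt compliance_reqs resource_type
instance (compliance_reqs : List String) (resource_type : String) (out : List String) : Decidable (Spec_map_compliance_requirements_py compliance_reqs resource_type out) := by unfold Spec_map_compliance_requirements_py; infer_instance

-- ===== CLAIM =====
def Claim_equal_map_compliance_requirements_py : Prop := ∀ (compliance_reqs : List String) (resource_type : String), Dom_map_compliance_requirements_py compliance_reqs resource_type → Spec_map_compliance_requirements_py compliance_reqs resource_type (map_compliance_requirements_py compliance_reqs resource_type)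

-- ===== LEMMAS AND PROOFS =====

-- lookup in the precomputed index, written out per key
theorem pv_getD (sec rel cost : List String) (k : String) :
    (PySem.Dict.ofList [("security", sec), ("reliability", rel), ("cost_optimization", cost)]).getD k []
    = if k = "security" then sec else if k = "reliability" then rel
      else if k = "cost_optimization" then cost else [] := by
  simp [PySem.Dict.ofList, PySem.Dict.update, PySem.Dict.getD_insert, PySem.Dict.getD_empty]
  split_ifs <;> simp_all

-- A's per-request if/elif cascade computes exactly B's precomputed index lookup
theorem pv_step_eq (resource_type req : String) (acc : List String) :
    (if PySem.Str.lower req = "security" then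
      if PySem.Str.isIn "s3" resource_type then
        acc ++ ["encryption", "public_access_block", "versioning"]
      else if PySem.Str.isIn "rds" resource_type then
        acc ++ ["encryption", "backup", "multi_az"]
      else if PySem.Str.isIn "security_group" resource_type then
        acc ++ ["restricted_ingress", "no_ssh_from_internet"]
      else acc
    else if PySem.Str.lower req = "reliability" then
      if PySem.Str.isIn "instance" resource_type then
        acc ++ ["auto_scaling", "health_checks"]
      else if PySem.Str.isIn "rds" resource_type then
        acc ++ ["multi_az", "backup_retention"]
      else acc
    else if PySem.Str.lower req = "cost_optimization" then
      acc ++ ["appropriate_sizing", "lifecycle_policies"]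
    else acc)
    = acc ++ (PySem.Dict.ofList (pvRules.map (fun p => (p.1, pvFirstMatch p.2 resource_type)))).getD (PySem.Str.lower req) [] := by
  have hm : pvRules.map (fun p => (p.1, pvFirstMatch p.2 resource_type))
      = [("security", pvFirstMatch
            [ (some "s3", ["encryption", "public_access_block", "versioning"]),
              (some "rds", ["encryption", "backup", "multi_az"]),
              (some "security_group", ["restricted_ingress", "no_ssh_from_internet"]) ] resource_type),
         ("reliability", pvFirstMatch
            [ (some "instance", ["auto_scaling", "health_checks"]),
              (some "rds", ["multi_az", "backup_retention"]) ] resource_type),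
         ("cost_optimization", pvFirstMatch
            [ (none, ["appropriate_sizing", "lifecycle_policies"]) ] resource_type)] := rfl
  rw [hm, pv_getD]
  by_cases h1 : PySem.Str.lower req = "security"
  · simp only [h1, if_true, pvFirstMatch]
    split_ifs <;> simp_all [pvFirstMatch]
  · by_cases h2 : PySem.Str.lower req = "reliability"
    · simp only [h2, pvFirstMatch]
      split_ifs <;> simp_all [pvFirstMatch]
    · by_cases h3 : PySem.Str.lower req = "cost_optimization"
      · simp [h3, pvFirstMatch]
      · simp [h1, h2, h3]

theorem pv_fold_eq (resource_type : String) (reqs : List String) (acc : List String) :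
    reqs.foldl (fun acc req =>
      if PySem.Str.lower req = "security" then
        if PySem.Str.isIn "s3" resource_type then
          acc ++ ["encryption", "public_access_block", "versioning"]
        else if PySem.Str.isIn "rds" resource_type then
          acc ++ ["encryption", "backup", "multi_az"]
        else if PySem.Str.isIn "security_group" resource_type then
          acc ++ ["restricted_ingress", "no_ssh_from_internet"]
        else acc
      else if PySem.Str.lower req = "reliability" then
        if PySem.Str.isIn "instance" resource_type then
          acc ++ ["auto_scaling", "health_checks"]
        else if PySem.Str.isIn "rds" resource_type then
          acc ++ ["multi_az", "backup_retention"]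
        else acc
      else if PySem.Str.lower req = "cost_optimization" then
        acc ++ ["appropriate_sizing", "lifecycle_policies"]
      else acc) acc
    = acc ++ reqs.flatMap (fun req =>
        (PySem.Dict.ofList (pvRules.map (fun p => (p.1, pvFirstMatch p.2 resource_type)))).getD
          (PySem.Str.lower req) []) := by
  induction reqs generalizing acc with
  | nil => simp
  | cons r rest ih =>
    simp only [List.foldl_cons, List.flatMap_cons]
    rw [pv_step_eq, ih, List.append_assoc]

-- ===== VERDICT =====
theorem map_compliance_requirements_py_spec : Claim_equal_map_compliance_requirements_py := by
  intro reqs rt _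
  unfold Spec_map_compliance_requirements_py map_compliance_requirements_py map_compliance_requirements_py_alt
  exact pv_fold_eq rt reqs []
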